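/-
  THE LANGUAGE jsmn ACCEPTS, PART 3b: THE TOKEN MODE OF THE DEFAULT BUILD — THE MAIN LOOP AND THE THEOREMS
  (definitions `brackets`, `tokenResult` and the lemmas about the token array: Json/Jsmn/AcceptLangTok.lean)

      token_mode_default          jsmn_init; jsmn_parse = tokenResult (lex false .top js)        (text < 2^31 bytes, room for the tokens)
      token_mode_default_accepts  accepted  ⟺  the lexer reaches the end of the text  ∧  the brackets are balanced
      count_of_token_mode_default what the token mode accepts, the counting mode accepts with the same count
-/
import Json.Jsmn.AcceptLangTok
set_option linter.unusedSimpArgs false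

namespace Jsmn.AcceptLang
open Jsmn

/-! ### The main loop -/

theorem natCast_ne_neg_one (q : Nat) : (q : Int) ≠ -1 := by omega

/-! Small arithmetic facts, proved here once: inside the long proof below `omega` is slow (its context is large). -/
theorem fuel_step {L pos q fuel : Nat} (hf : L - pos < fuel + 1) (h : pos ≤ q) (hq : q < L) : L - (q + 1) < fuel := by omega
theorem fuel_keep {L pos fuel : Nat} (hf : L - pos < fuel + 1) : L - (pos + 1) < fuel + 1 := by omega
theorem lt32_of_lt {q L : Nat} (hq : q < L) (hL : L < 2147483648) : q + 1 < 4294967296 := by omega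
theorem lt31_of_lt {q L : Nat} (hq : q < L) (hL : L < 2147483648) : q + 1 < 2147483648 := by omega
theorem i32_nat {q : Nat} (hq : q < 2147483648) : i32 (q : Int) = q := by unfold i32; omega
theorem pred_facts {pos q L : Nat} (h1 : pos < q) (h2 : q ≤ L) (hL : L < 2147483648) :
    q - 1 + 1 = q ∧ u32 ((q : Int) - 1) = q - 1 ∧ i32 (q : Int) = q ∧ pos ≤ q - 1 ∧ q - 1 < L := by
  refine ⟨by omega, u32_pred (by omega) (by omega), by unfold i32; omega, by omega, by omega⟩

/-- What the main loop does with the answer of its body: return, or go on at the next byte. -/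
def stepOn (cfg : Config) (js : List UInt8) (n fuel : Nat) : Option Step → Option (Int × St)
  | none => none
  | some (.ret r s') => some (r, s')
  | some (.next s') => loop cfg js n fuel { s' with p := { s'.p with pos := u32 (s'.p.pos + 1) } }

theorem loop_succ (cfg : Config) (js : List UInt8) (n fuel : Nat) (s : St) (h : more js s.p.pos = true) :
    loop cfg js n (fuel + 1) s = stepOn cfg js n fuel (body cfg js (fuel + 1) n s (charAt js s.p.pos)) := by
  rw [loop, if_pos h]
  cases body cfg js (fuel + 1) n s (charAt js s.p.pos) with
  | none => rfl
  | some st => cases st <;> rfl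

/-- What we look at of the loop's answer: the result, and whether there still is a token array. -/
def view (o : Option (Int × St)) : Option (Int × Bool) := o.map fun x => (x.1, x.2.toks.isSome)

/-- The main loop of the default build in token mode, from any position: what `resultFrom` says about the rest of the text. -/
theorem loop_tok (js : List UInt8) (n : Nat) (hL : js.length < 2147483648) : ∀ fuel pos tn sup ts st,
    pos ≤ js.length → js.length - pos < fuel → ts.length = n → tn ≤ pos →
    Room tn (lex false .top (js.drop pos)).1 n → opens ts tn = st.map Kind.type →
    view (loop .default js n fuel ⟨⟨pos, tn, sup⟩, some ts, (tn : Int)⟩) =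
      some (resultFrom st tn (lex false .top (js.drop pos)), true) := by
  intro fuel
  induction fuel with
  | zero => intro pos _ _ _ _ _ h; omega
  | succ fuel ih =>
    intro pos tn sup ts st hp hf hlen hle hroom hop
    cases hd : js.drop pos with
    | nil =>
      rw [loop]
      simp [view, more_of_drop_nil hd, finish_default sup tn st hop (by omega), lex, resultFrom, brackets, tokCount]
    | cons c t =>
      obtain ⟨hlt, hc, ht, hm⟩ := of_drop_cons hd
      rw [hd] at hroom
      have hpos31 : pos + 1 < 2147483648 := by omega
      have htn31 : tn < 2147483647 := by omega
      have htn31' : tn < 2147483648 := by omega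
      have hpos32 : pos + 1 < 4294967296 := by omega
      have hu : u32 ((pos : Int) + 1) = pos + 1 := u32_succ hpos32
      have hi : i32 ((tn : Int) + 1) = ((tn + 1 : Nat) : Int) := by unfold i32; omega
      by_cases h0 : c = 0
      · rw [loop]
        simp [view, hm, h0, finish_default sup tn st hop (by omega), lex, resultFrom, brackets, tokCount]
      have hm' : more js pos = true := by simp [hm, h0]
      rw [loop_succ _ _ _ _ _ hm']
      simp only [hc]
      have next1 : ∀ tn' sup' ts' st', ts'.length = n → tn' ≤ pos + 1 → Room tn' (lex false .top t).1 n →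
          opens ts' tn' = st'.map Kind.type →
          view (loop .default js n fuel ⟨⟨pos + 1, tn', sup'⟩, some ts', (tn' : Int)⟩) =
            some (resultFrom st' tn' (lex false .top t), true) := by
        intro tn' sup' ts' st' h1 h2 h3 h4
        have := ih (pos + 1) tn' sup' ts' st' hlt (fuel_step hf (Nat.le_refl pos) hlt) h1 h2 (by rwa [ht]) h4
        rwa [ht] at this
      -- an opening bracket of kind `k`
      have hopen : ∀ k : Kind, (c = 0x7b ∧ k = .obj ∨ c = 0x5b ∧ k = .arr) →
          lex false .top (c :: t) = push k.openItem (lex false .top t) →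
          body .default js (fuel + 1) n ⟨⟨pos, tn, sup⟩, some ts, (tn : Int)⟩ c =
            some (openBracket .default c n ⟨⟨pos, tn, sup⟩, some ts, (tn : Int)⟩) →
          view (stepOn .default js n fuel (body .default js (fuel + 1) n ⟨⟨pos, tn, sup⟩, some ts, (tn : Int)⟩ c)) =
            some (resultFrom st tn (lex false .top (c :: t)), true) := by
        intro k hk hlex hbody
        rw [hlex] at hroom
        obtain ⟨hr1, hroom'⟩ := Room.tok (by cases k <;> rfl) hroom
        obtain ⟨ts', sup', hob, hl', hop'⟩ := openBracket_default (pos := pos) sup (tn : Int) k c hk hlen hr1 htn31 (Nat.lt_of_succ_lt hpos31)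
        rw [hbody, hob, hlex, resultFrom_open]
        simp only [stepOn, hu, hi]
        have := next1 (tn + 1) sup' ts' (k :: st) hl' (Nat.succ_le_succ hle)
          hroom' (by rw [hop', hop]; rfl)
        simpa using this
      -- a closing bracket of kind `k`
      have hclose : ∀ k : Kind, lex false .top (c :: t) = push k.closeItem (lex false .top t) →
          body .default js (fuel + 1) n ⟨⟨pos, tn, sup⟩, some ts, (tn : Int)⟩ c =
            some (closeScan k.type ⟨⟨pos, tn, sup⟩, some ts, (tn : Int)⟩ ts) →
          view (stepOn .default js n fuel (body .default js (fuel + 1) n ⟨⟨pos, tn, sup⟩, some ts, (tn : Int)⟩ c)) =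
            some (resultFrom st tn (lex false .top (c :: t)), true) := by
        intro k hlex hbody
        rw [hlex] at hroom
        have hroom' := Room.non (by cases k <;> rfl) hroom
        have hcs := closeScan_default (pos := pos) sup (tn : Int) k st hop htn31' hpos31
        rw [hbody, hlex, resultFrom_close]
        cases st with
        | nil => simp only [] at hcs; rw [hcs]; rfl
        | cons k' st' =>
          simp only [] at hcs ⊢
          by_cases hk : k' = k
          · simp only [hk, if_true] at hcs ⊢
            obtain ⟨ts', sup', hcs', hl', hop'⟩ := hcs
            rw [hcs']
            simp only [stepOn, hu]
            exact next1 tn sup' ts' st' (by rw [hl', hlen]) (Nat.le_succ_of_le hle)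
              hroom' hop'
          · simp only [hk, if_false] at hcs ⊢
            rw [hcs]; rfl
      by_cases h1 : c = 0x7b
      · subst h1
        exact hopen .obj (Or.inl ⟨rfl, rfl⟩) (by simp [lex, Kind.openItem]) (by simp [body])
      by_cases h2 : c = 0x5b
      · subst h2
        exact hopen .arr (Or.inr ⟨rfl, rfl⟩) (by simp [lex, Kind.openItem]) (by simp [body])
      by_cases h3 : c = 0x7d
      · subst h3
        exact hclose .obj (by simp [lex, Kind.closeItem]) (by simp [body, closeBracket, Config.default, Kind.type])
      by_cases h4 : c = 0x5d
      · subst h4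
        exact hclose .arr (by simp [lex, Kind.closeItem]) (by simp [body, closeBracket, Config.default, Kind.type])
      have hpl : Config.default.parentLinks = false := rfl
      have hstrict : Config.default.strict = false := rfl
      have hinval : ∀ cnt : Int, resultFrom st cnt ([], .inval) = JSMN_ERROR_INVAL := by intro cnt; simp [resultFrom, brackets]
      have hpart : ∀ cnt : Int, resultFrom st cnt ([], .part) = JSMN_ERROR_PART := by intro cnt; simp [resultFrom, brackets]
      -- a string or primitive token has been made: go on behind it, at `q + 1`
      have goOn : ∀ (q : Nat) (type : Nat) (a b : Int), pos ≤ q → q < js.length → b ≠ -1 → tn < n →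
          Room (tn + 1) (lex false .top (js.drop (q + 1))).1 n →
          view (stepOn .default js n fuel (some (.next ⟨⟨q, tn + 1, sup⟩,
            bumpSuper ⟨q, tn + 1, sup⟩ (some (fillAt ts tn type a b)), ((tn + 1 : Nat) : Int)⟩))) =
          some (resultFrom st ((tn : Int) + 1) (lex false .top (js.drop (q + 1))), true) := by
        intro q type a b hq1 hq2 hb hr1 hr2
        obtain ⟨ts', hbs, hl', hop'⟩ := opens_after_fill (ts := ts) (tn := tn) ⟨q, tn + 1, sup⟩ type a b (by rw [hlen]; exact hr1) hb
        rw [hbs]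
        have hu' : u32 ((q : Int) + 1) = q + 1 := u32_succ (lt32_of_lt hq2 hL)
        simp only [stepOn, hu']
        have := ih (q + 1) (tn + 1) sup ts' st hq2 (fuel_step hf hq1 hq2) (by rw [hl', hlen]) (Nat.succ_le_succ (Nat.le_trans hle hq1)) hr2 (by rw [hop', hop])
        simpa using this
      by_cases h5 : c = 0x22
      · subst h5
        obtain ⟨r, hr, hrel⟩ := strScan_sim false js hL (fuel + 1) (pos + 1) hlt (fuel_keep hf)
        have hlex : lex false .top (0x22 :: t) = push .str (lex false (.str 0) (js.drop (pos + 1))) := by simp [lex, ht]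
        rw [hlex] at hroom
        obtain ⟨hr1, hroom'⟩ := Room.tok rfl hroom
        rw [hlex, resultFrom_tok _ _ _ (Or.inl rfl)]
        have hb0 : body .default js (fuel + 1) n ⟨⟨pos, tn, sup⟩, some ts, (tn : Int)⟩ 0x22 =
            (match parseString .default js (fuel + 1) ⟨pos, tn, sup⟩ (some ts) n with
              | none => none
              | some (r, p, toks) =>
                if r < 0 then some (.ret r ⟨p, toks, (tn : Int)⟩) else some (.next ⟨p, bumpSuper p toks, i32 ((tn : Int) + 1)⟩)) := by
          simp [body]; rfl
        rw [hb0]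
        cases r with
        | bad =>
          simp only [StrRel] at hrel
          rw [hrel, hinval]
          simp [parseString, hu, hr, stepOn, view, JSMN_ERROR_INVAL]
        | eoi =>
          simp only [StrRel] at hrel
          rw [hrel, hpart]
          simp [parseString, hu, hr, stepOn, view, JSMN_ERROR_PART]
        | quote q =>
          simp only [StrRel] at hrel
          obtain ⟨hq1, hq2, hq3⟩ := hrel
          have hiq : i32 (q : Int) = q := i32_nat (Nat.lt_trans hq2 hL)
          rw [parseString_quote_default hr hpos32 hr1 htn31', hq3]
          simp only [Int.lt_irrefl, if_false, hi]
          have hr2 : Room (tn + 1) (lex false .top (js.drop (q + 1))).1 n := by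
            rw [hq3] at hroom'; exact hroom'
          have hle : pos ≤ q := Nat.le_of_succ_le hq1
          have hb : i32 (q : Int) ≠ -1 := by rw [hiq]; exact natCast_ne_neg_one q
          exact goOn q JSMN_STRING (i32 (i32 ↑pos + 1)) (i32 ↑q) hle hq2 hb hr1 hr2
      by_cases h6 : isWs c = true
      · have h6' := h6
        simp only [isWs, Bool.or_eq_true, beq_iff_eq] at h6'
        have hb : body .default js (fuel + 1) n ⟨⟨pos, tn, sup⟩, some ts, (tn : Int)⟩ c = some (.next ⟨⟨pos, tn, sup⟩, some ts, (tn : Int)⟩) := by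
          rcases h6' with ((h | h) | h) | h <;> subst h <;> simp [body]
        have hlex : lex false .top (c :: t) = lex false .top t := by
          rcases h6' with ((h | h) | h) | h <;> subst h <;> simp [lex, isWs]
        rw [hb, hlex]
        rw [hlex] at hroom
        simp only [stepOn, hu]
        exact next1 tn sup ts st hlen (Nat.le_succ_of_le hle) hroom hop
      have h6' : ¬(((c = 0x09 ∨ c = 0x0d) ∨ c = 0x0a) ∨ c = 0x20) := by
        simpa [isWs] using h6
      have hws : isWs c = false := by simpa using h6
      by_cases h7 : c = 0x3a
      · subst h7
        have hb : body .default js (fuel + 1) n ⟨⟨pos, tn, sup⟩, some ts, (tn : Int)⟩ 0x3a =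
            some (.next ⟨⟨pos, tn, i32 ((tn : Int) - 1)⟩, some ts, (tn : Int)⟩) := by simp [body]
        have hlex : lex false .top (0x3a :: t) = push .colon (lex false .top t) := by simp [lex, isWs]
        rw [hlex] at hroom
        have hroom' := Room.non rfl hroom
        rw [hb, hlex, resultFrom_other _ _ _ (Or.inl rfl)]
        simp only [stepOn, hu]
        exact next1 tn _ ts st hlen (Nat.le_succ_of_le hle) hroom' hop
      by_cases h8 : c = 0x2c
      · subst h8
        obtain ⟨sup', hcm⟩ := comma_default pos tn sup (tn : Int) ts
        have hb : body .default js (fuel + 1) n ⟨⟨pos, tn, sup⟩, some ts, (tn : Int)⟩ 0x2c =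
            some (comma .default ⟨⟨pos, tn, sup⟩, some ts, (tn : Int)⟩) := by simp [body]
        have hlex : lex false .top (0x2c :: t) = push .comma (lex false .top t) := by simp [lex, isWs]
        rw [hlex] at hroom
        have hroom' := Room.non rfl hroom
        rw [hb, hcm, hlex, resultFrom_other _ _ _ (Or.inr rfl)]
        simp only [stepOn, hu]
        exact next1 tn _ ts st hlen (Nat.le_succ_of_le hle) hroom' hop
      -- a primitive
      have hb : body .default js (fuel + 1) n ⟨⟨pos, tn, sup⟩, some ts, (tn : Int)⟩ c =
          primitiveCase .default js (fuel + 1) n ⟨⟨pos, tn, sup⟩, some ts, (tn : Int)⟩ := by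
        simp only [body]
        simp [h1, h2, h3, h4, h5, h6', h7, h8, hstrict]
      have hns : primStop .default c = false := by
        simp [primStop, h7, h8, h3, h4]
        simpa [not_or] using h6'
      rw [hb]
      by_cases hnp : notPrintable c = true
      · -- not a printable byte: -2
        have hps : primScan .default js (fuel + 1) pos = some .bad := by
          have : (c.toNat < 32 || c.toNat ≥ 127) = true := hnp
          rw [primScan]; simp only [hm', hc, hns, if_true, this]; rfl
        have hlex : lex false .top (c :: t) = ([], .inval) := by simp [lex, h0, h1, h2, h3, h4, h5, hws, h7, h8, hnp]
        rw [hlex, hinval]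
        simp [primitiveCase, parsePrimitive, hps, stepOn, view, JSMN_ERROR_INVAL]
      have hnp' : notPrintable c = false := by simpa using hnp
      have hlex : lex false .top (c :: t) = push .prim (lex false .prim (js.drop pos)) := by
        rw [hd]; simp [lex, h0, h1, h2, h3, h4, h5, hws, h7, h8, hnp']
      rw [hlex] at hroom
      obtain ⟨hr1, hroom'⟩ := Room.tok rfl hroom
      rw [hlex, resultFrom_tok _ _ _ (Or.inr rfl)]
      obtain ⟨r, hr, hrel⟩ := primScan_sim .default js hL (fuel + 1) pos hp hf
      have hip : i32 (pos : Int) = pos := i32_nat (Nat.lt_of_succ_lt hpos31)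
      -- the primitive ends at `q`
      have hend : ∀ q, (r = .found q ∨ r = .eoi q) → pos < q → q ≤ js.length →
          lex false .prim (js.drop pos) = lex false .top (js.drop q) →
          view (stepOn .default js n fuel (primitiveCase .default js (fuel + 1) n ⟨⟨pos, tn, sup⟩, some ts, (tn : Int)⟩)) =
            some (resultFrom st ((tn : Int) + 1) (lex false .prim (js.drop pos)), true) := by
        intro q hq hq1 hq2 hq4
        obtain ⟨hq0, hup, hiq, hle1, hlt1⟩ := pred_facts hq1 hq2 hL
        have hr2 : Room (tn + 1) (lex false .top (js.drop (q - 1 + 1))).1 n := by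
          rw [hq0, ← hq4]; exact hroom'
        have := goOn (q - 1) JSMN_PRIMITIVE (i32 pos) (i32 q) hle1 hlt1 (by rw [hiq]; exact natCast_ne_neg_one q) hr1 hr2
        rw [hq0, ← hq4] at this
        simp only [primitiveCase, parsePrimitive_found_default hr hq hr1 htn31', Int.lt_irrefl, if_false, hi, hup]
        exact this
      cases r with
      | bad =>
        simp only [PrimRel, hstrict] at hrel
        rw [hrel, hinval]
        simp [primitiveCase, parsePrimitive, hr, stepOn, view, JSMN_ERROR_INVAL]
      | found q =>
        simp only [PrimRel, hstrict] at hrel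
        obtain ⟨hq1, hq2, hq3, hq4, _⟩ := hrel
        have hne : q ≠ pos := by intro h; rw [h, hc, hns] at hq3; cases hq3
        exact hend q (Or.inl rfl) (Nat.lt_of_le_of_ne hq1 (Ne.symm hne)) (Nat.le_of_lt hq2) hq4
      | eoi q =>
        simp only [PrimRel, hstrict] at hrel
        obtain ⟨hq1, hq2, hq3, hq4, _⟩ := hrel
        have hne : q ≠ pos := by intro h; rw [h, hm'] at hq3; cases hq3
        have hq5 : lex false .prim (js.drop pos) = lex false .top (js.drop q) := by
          rw [hq4, lex_top_of_not_more _ hq3]; rfl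
        exact hend q (Or.inr rfl) (Nat.lt_of_le_of_ne hq1 (Ne.symm hne)) hq2 hq5


/-! ### The theorems -/

/-- **TOKEN MODE OF THE DEFAULT BUILD, EXACTLY.** On a text shorter than 2^31 bytes, with an array of `n` tokens (any content) that has room
for the tokens the lexer finds, `jsmn_init; jsmn_parse` answers `tokenResult (lex false .top js)`: -2 at the first closing bracket that
does not close the innermost open container of its kind; else -2 / -3 if the lexer ends with `inval` / `part`; else -3 if a container is
still open; else the number of tokens. -/
theorem token_mode_default (js : List UInt8) (ts : Tokens) (n : Nat) (hL : js.length < 2147483648) (hts : ts.length = n)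
    (hroom : tokCount (lex false .top js).1 ≤ n) :
    ∃ ts', run .default js (some ts) n = some (tokenResult (lex false .top js), some ts') := by
  have h := loop_tok js n hL (js.length + 1) 0 0 (-1) ts [] (Nat.zero_le _) (by omega) hts (Nat.le_refl 0)
    (by simpa [Room] using hroom) rfl
  simp only [List.drop_zero, view] at h
  have h32 : i32 ((0 : Nat) : Int) = ((0 : Nat) : Int) := by decide
  cases hl : loop .default js n (js.length + 1) ⟨⟨0, 0, -1⟩, some ts, ((0 : Nat) : Int)⟩ with
  | none => rw [hl] at h; cases h
  | some x =>
    rw [hl] at h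
    simp only [Option.map_some, Option.some.injEq, Prod.mk.injEq] at h
    obtain ⟨h1, h2⟩ := h
    cases hx : x.2.toks with
    | none => rw [hx] at h2; cases h2
    | some ts' =>
      refine ⟨ts', ?_⟩
      simp only [run, parse, parseFuel, Parser.init, h32, hl, Option.map_some, hx, h1, tokenResult]
      rfl

/-- Room for as many tokens as the text has bytes is always enough. -/
theorem token_mode_default_len (js : List UInt8) (ts : Tokens) (n : Nat) (hL : js.length < 2147483648) (hts : ts.length = n)
    (hn : js.length ≤ n) : ∃ ts', run .default js (some ts) n = some (tokenResult (lex false .top js), some ts') :=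
  token_mode_default js ts n hL hts (Nat.le_trans (tokCount_lex_le false js .top) hn)

/-- `tokenResult` is a count exactly when the lexer reaches the end of the text and the brackets are balanced; the count is the number of tokens. -/
theorem tokenResult_nonneg (r : List Item × Ending) :
    0 ≤ tokenResult r ↔ r.2 = .eof ∧ brackets [] r.1 = some [] := by
  simp only [tokenResult, resultFrom]
  cases hb : brackets [] r.1 with
  | none => simp [JSMN_ERROR_INVAL]
  | some st =>
    cases he : r.2 <;> simp [JSMN_ERROR_INVAL, JSMN_ERROR_PART]
    cases st with
    | nil => simp
    | cons k st => simp

theorem tokenResult_value (r : List Item × Ending) (h : r.2 = .eof ∧ brackets [] r.1 = some []) :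
    tokenResult r = tokCount r.1 := by
  simp [tokenResult, resultFrom, h.1, h.2]

/-- **THE LANGUAGE THE DEFAULT BUILD ACCEPTS** (token mode, enough tokens): the texts on which the lexer reaches the end and whose brackets
are balanced. The answer is then the number of tokens. -/
theorem token_mode_default_accepts (js : List UInt8) (ts : Tokens) (n : Nat) (hL : js.length < 2147483648) (hts : ts.length = n)
    (hroom : tokCount (lex false .top js).1 ≤ n) :
    (∃ r ts', 0 ≤ r ∧ run .default js (some ts) n = some (r, some ts')) ↔
      (lex false .top js).2 = .eof ∧ brackets [] (lex false .top js).1 = some [] := by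
  obtain ⟨ts', h⟩ := token_mode_default js ts n hL hts hroom
  rw [← tokenResult_nonneg]
  constructor
  · rintro ⟨r, ts'', hr, h'⟩
    rw [h] at h'
    simp only [Option.some.injEq, Prod.mk.injEq] at h'
    rw [h'.1]; exact hr
  · intro hr
    exact ⟨_, ts', hr, h⟩

/-- Whatever the token mode of the default build accepts, the counting mode accepts too, with the same count. (Not the other way round:
`]`, `[}`, `[` are accepted by the counting mode only.) -/
theorem count_of_token_mode_default (js : List UInt8) (h : 0 ≤ tokenResult (lex false .top js)) :
    countResult (lex false .top js) = tokenResult (lex false .top js) := by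
  have h' := (tokenResult_nonneg _).mp h
  rw [tokenResult_value _ h']
  simp [countResult, h'.1]

end Jsmn.AcceptLang
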